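-- pv_equiv track=rewrite | github.com/Daz4Dev/GENETIC | fragmenting.py | split_vector
-- ===== SOURCE A (Python) =====
-- def split_vector(Z, F):
--     result = []
--     current_sublist = []
--
--     for i in range(len(Z)):
--         current_sublist.append(Z[i])
--
--         if F[i] == 1 or i == len(Z) - 1:
--             result.append(current_sublist)
--             current_sublist = []
--
--     return result
-- ===== SOURCE B (Python) =====
-- def split_vector(Z, F):
--     cuts = [i for i in range(len(Z)) if F[i] == 1]
--     result = []
--     start = 0
--     for i in cuts:
--         result.append(Z[start:i + 1])
--         start = i + 1
--     if start < len(Z):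
--         result.append(Z[start:])
--     return result
-- ===== Notes on version B (the rewrite author's own statement) =====
-- stated objective: alternative
-- what changed: B first collects the cut indices (where F[i]==1), then builds each sublist in one slice per segment plus a final tail slice, instead of A's element-by-element append into an incrementally grown current sublist.
import Mathlib
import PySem

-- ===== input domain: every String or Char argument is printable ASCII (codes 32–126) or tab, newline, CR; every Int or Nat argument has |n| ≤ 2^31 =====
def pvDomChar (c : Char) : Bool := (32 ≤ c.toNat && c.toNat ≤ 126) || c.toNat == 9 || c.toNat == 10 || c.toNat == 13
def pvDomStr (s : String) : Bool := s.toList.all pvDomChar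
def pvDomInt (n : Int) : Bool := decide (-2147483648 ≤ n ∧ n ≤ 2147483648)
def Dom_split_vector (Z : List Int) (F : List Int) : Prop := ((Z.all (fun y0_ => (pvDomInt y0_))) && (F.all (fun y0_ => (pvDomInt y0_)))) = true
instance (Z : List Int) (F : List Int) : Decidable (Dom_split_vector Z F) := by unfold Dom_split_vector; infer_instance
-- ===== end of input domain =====

-- B builds the sublists by slicing at precomputed cut indices instead of A's incremental appends; alternative decomposition, same cost.


-- ===== PORT A =====
def split_vector (Z : List Int) (F : List Int) : List (List Int) :=
  ((PySem.List.pyRange 0 (Z.length : Int) 1).foldl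
    (fun (st : List (List Int) × List Int) (i : Int) =>
      let cur := st.2 ++ [PySem.List.pyGetD Z i 0]
      if PySem.List.pyGetD F i 0 = 1 ∨ i = (Z.length : Int) - 1 then
        (st.1 ++ [cur], [])
      else
        (st.1, cur))
    ([], [])).1

-- ===== PORT B =====
def split_vector_alt (Z : List Int) (F : List Int) : List (List Int) :=
  let cuts := (PySem.List.pyRange 0 (Z.length : Int) 1).filter
      (fun i => PySem.List.pyGetD F i 0 == 1)
  let st := cuts.foldl
    (fun (st : List (List Int) × Int) (i : Int) =>
      (st.1 ++ [PySem.List.slice Z (some st.2) (some (i + 1))], i + 1))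
    ([], 0)
  if st.2 < (Z.length : Int) then st.1 ++ [PySem.List.slice Z (some st.2) none] else st.1

-- ===== PRECONDITION & SPEC =====
-- Pre_ excludes inputs with len(F) < len(Z), on which both Pythons raise IndexError at F[i].
def Pre_split_vector (Z : List Int) (F : List Int) : Prop := Z.length ≤ F.length
instance (Z : List Int) (F : List Int) : Decidable (Pre_split_vector Z F) := by unfold Pre_split_vector; infer_instance
def pvWitness_split_vector : List Int × List Int := ([1, 2, 3], [1, 0, 0])
def Spec_split_vector (Z : List Int) (F : List Int) (out : List (List Int)) : Prop := out = split_vector_alt Z F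
instance (Z : List Int) (F : List Int) (out : List (List Int)) : Decidable (Spec_split_vector Z F out) := by unfold Spec_split_vector; infer_instance

-- ===== CLAIM (what is proved, stated in full; the proofs are below) =====
def Claim_equal_split_vector : Prop := ∀ (Z : List Int) (F : List Int), Dom_split_vector Z F → Pre_split_vector Z F → Spec_split_vector Z F (split_vector Z F)

-- ===== LEMMAS AND PROOFS =====

-- A's loop body (without the let, as an explicit function) and B's loop body.
def pvStepA (Z F : List Int) (st : List (List Int) × List Int) (i : Int) : List (List Int) × List Int :=
  if PySem.List.pyGetD F i 0 = 1 ∨ i = (Z.length : Int) - 1 then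
    (st.1 ++ [st.2 ++ [PySem.List.pyGetD Z i 0]], [])
  else
    (st.1, st.2 ++ [PySem.List.pyGetD Z i 0])

def pvStepB (Z : List Int) (st : List (List Int) × Int) (i : Int) : List (List Int) × Int :=
  (st.1 ++ [PySem.List.slice Z (some st.2) (some (i + 1))], i + 1)

lemma split_vector_eq (Z F : List Int) :
    split_vector Z F
      = ((PySem.List.pyRange 0 (Z.length : Int) 1).foldl (pvStepA Z F) ([], [])).1 := rfl

lemma split_vector_alt_eq (Z F : List Int) :
    split_vector_alt Z F
      = (let st := (((PySem.List.pyRange 0 (Z.length : Int) 1).filter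
            (fun i => PySem.List.pyGetD F i 0 == 1)).foldl (pvStepB Z) ([], 0));
         if st.2 < (Z.length : Int) then st.1 ++ [PySem.List.slice Z (some st.2) none] else st.1) := rfl

-- appending the next element extends the slice by one
lemma pv_slice_snoc (Z : List Int) (s k : Nat) (hs : s ≤ k) (hk : k < Z.length) :
    PySem.List.slice Z (some (s : Int)) (some (k : Int)) ++ [PySem.List.pyGetD Z (k : Int) 0]
      = PySem.List.slice Z (some (s : Int)) (some ((k : Int) + 1)) := by
  have h1 : ((k : Int) + 1) = ((k + 1 : Nat) : Int) := by push_cast; ring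
  have hg : PySem.List.pyGetD Z ((k : Nat) : Int) 0 = Z[k] := by
    simp only [PySem.List.pyGetD_natCast]
    exact List.getD_eq_getElem Z 0 hk
  rw [h1, PySem.List.slice_natCast, PySem.List.slice_natCast, hg]
  have hlen : k - s < (Z.drop s).length := by simp [List.length_drop]; omega
  have h2 : k + 1 - s = (k - s) + 1 := by omega
  rw [h2, List.take_add_one, List.getElem?_eq_getElem hlen]
  simp [List.getElem_drop]
  congr 1
  omega

lemma pv_slice_self (Z : List Int) (a : Int) :
    PySem.List.slice Z (some a) (some a) = [] := by
  apply List.eq_nil_of_length_eq_zero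
  rw [PySem.List.length_slice]
  omega

-- the loop invariant: after processing indices 0..k-1 (k < len Z, so the
-- last-index clause never fires), A's state is (B's accumulated slices,
-- the slice from B's start pointer to k), and B's start pointer is a Nat ≤ k.
lemma pv_inv (Z F : List Int) :
    ∀ k : Nat, k < Z.length →
    ∃ (acc : List (List Int)) (s : Nat), s ≤ k ∧
      ((PySem.List.pyRange 0 (k : Int) 1).foldl (pvStepA Z F) ([], [])
        = (acc, PySem.List.slice Z (some (s : Int)) (some (k : Int)))) ∧
      (((PySem.List.pyRange 0 (k : Int) 1).filter
          (fun i => PySem.List.pyGetD F i 0 == 1)).foldl (pvStepB Z) ([], 0)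
        = (acc, (s : Int))) := by
  intro k
  induction k with
  | zero =>
    intro _
    refine ⟨[], 0, le_refl _, ?_, ?_⟩
    · rw [PySem.List.pyRange_one_eq_nil (by omega)]
      simp only [List.foldl_nil]
      rw [pv_slice_self]
    · rw [PySem.List.pyRange_one_eq_nil (by omega)]
      rfl
  | succ k ih =>
    intro hk1
    obtain ⟨acc, s, hs, hA, hB⟩ := ih (by omega)
    have hnotlast : ¬ ((k : Int) = (Z.length : Int) - 1) := by omega
    have hcast : ((k + 1 : Nat) : Int) = (k : Int) + 1 := by push_cast; ring
    have hrange : PySem.List.pyRange 0 ((k + 1 : Nat) : Int) 1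
        = PySem.List.pyRange 0 (k : Int) 1 ++ [(k : Int)] := by
      rw [hcast, PySem.List.pyRange_one_succ_right (by omega)]
    rw [hrange, List.foldl_append, hA, List.filter_append, List.foldl_append, hB]
    by_cases hf : PySem.List.pyGetD F (k : Int) 0 = 1
    · refine ⟨acc ++ [PySem.List.slice Z (some (s : Int)) (some ((k : Int) + 1))], k + 1,
        le_refl _, ?_, ?_⟩
      · simp only [List.foldl_cons, List.foldl_nil, pvStepA, if_pos (Or.inl hf)]
        rw [pv_slice_snoc Z s k hs (by omega), hcast, pv_slice_self]
      · rw [List.filter_singleton,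
            show (PySem.List.pyGetD F (k : Int) 0 == 1) = true from by simpa using hf, cond_true]
        simp only [List.foldl_cons, List.foldl_nil, pvStepB]
        rw [hcast]
    · refine ⟨acc, s, by omega, ?_, ?_⟩
      · simp only [List.foldl_cons, List.foldl_nil, pvStepA]
        rw [if_neg (by intro h; rcases h with h | h; exacts [hf h, hnotlast h])]
        rw [pv_slice_snoc Z s k hs (by omega), hcast]
      · rw [List.filter_singleton,
            show (PySem.List.pyGetD F (k : Int) 0 == 1) = false from by simpa using hf, cond_false]
        simp

-- ===== VERDICT (by name: the statement is the Claim_ definition above) =====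
theorem split_vector_spec : Claim_equal_split_vector := by
  intro Z F _hDom _hPre
  unfold Spec_split_vector
  rw [split_vector_eq, split_vector_alt_eq]
  rcases Nat.eq_zero_or_pos Z.length with hn | hn
  · simp [hn, PySem.List.pyRange_one_eq_nil]
  · -- n = k + 1 with k = Z.length - 1
    obtain ⟨k, hk⟩ : ∃ k, Z.length = k + 1 := ⟨Z.length - 1, by omega⟩
    obtain ⟨acc, s, hs, hA, hB⟩ := pv_inv Z F k (by omega)
    have hcast : ((Z.length : Int)) = (k : Int) + 1 := by rw [hk]; push_cast; ring
    have hrange : PySem.List.pyRange 0 (Z.length : Int) 1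
        = PySem.List.pyRange 0 (k : Int) 1 ++ [(k : Int)] := by
      rw [hcast, PySem.List.pyRange_one_succ_right (by omega)]
    rw [hrange, List.foldl_append, hA, List.filter_append, List.foldl_append, hB]
    have hlast : (k : Int) = (Z.length : Int) - 1 := by omega
    have hsnoc := pv_slice_snoc Z s k hs (by omega)
    by_cases hf : PySem.List.pyGetD F (k : Int) 0 = 1
    · -- flag at the last index: B's final start pointer is len Z, tail branch off
      rw [List.filter_singleton,
        show (PySem.List.pyGetD F (k : Int) 0 == 1) = true from by simpa using hf, cond_true]
      simp only [List.foldl_cons, List.foldl_nil, pvStepA, pvStepB, if_pos (Or.inl hf)]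
      rw [hsnoc]
      simp [hcast]
    · -- no flag at the last index: A closes via i == len-1; B takes the tail slice
      rw [List.filter_singleton,
        show (PySem.List.pyGetD F (k : Int) 0 == 1) = false from by simpa using hf, cond_false]
      simp only [List.foldl_cons, List.foldl_nil, pvStepA, if_pos (Or.inr hlast)]
      rw [hsnoc]
      have hlt : (s : Int) < (Z.length : Int) := by omega
      rw [if_pos hlt]
      have : PySem.List.slice Z (some ((s : Nat) : Int)) none = Z.drop s :=
        PySem.List.slice_from_natCast Z s
      rw [this]
      have : PySem.List.slice Z (some (s : Int)) (some ((k : Int) + 1)) = Z.drop s := by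
        rw [show ((k : Int) + 1) = ((k + 1 : Nat) : Int) from by push_cast; ring,
            PySem.List.slice_natCast]
        apply List.take_of_length_le
        simp [List.length_drop]; omega
      rw [this]
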